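-- pv_equiv track=rewrite | github.com/brightway-lca/bw_hybrid | size.py | get_cumulative_size
-- ===== SOURCE A (Python) =====
-- def get_cumulative_size(package, dependencies, direct_sizes, cumulative_sizes):
--     """Calculate cumulative size including all dependencies."""
--     if package in cumulative_sizes:
--         return cumulative_sizes[package]
--     size = direct_sizes.get(package, 0)
--     for dep in dependencies.get(package, []):
--         size += get_cumulative_size(dep, dependencies, direct_sizes, cumulative_sizes)
--     cumulative_sizes[package] = size
--     return size
-- ===== SOURCE B (Python) =====
-- def get_cumulative_size(package, dependencies, direct_sizes, cumulative_sizes):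
--     """Calculate cumulative size including all dependencies.
--
--     Iterative version: an explicit stack of (node, pending deps, accumulated size)
--     frames replaces the recursion; mutates cumulative_sizes exactly like the
--     recursive version (same entries, same insertion order).
--     """
--     if package in cumulative_sizes:
--         return cumulative_sizes[package]
--     stack = [(package, dependencies.get(package, []), direct_sizes.get(package, 0))]
--     while True:
--         node, pending, acc = stack.pop()
--         if pending:
--             dep = pending[0]
--             if dep in cumulative_sizes:
--                 stack.append((node, pending[1:], acc + cumulative_sizes[dep]))
--             else:
--                 stack.append((node, pending[1:], acc))
--                 stack.append((dep, dependencies.get(dep, []), direct_sizes.get(dep, 0)))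
--         else:
--             cumulative_sizes[node] = acc
--             if not stack:
--                 return acc
--             pnode, ppending, pacc = stack.pop()
--             stack.append((pnode, ppending, pacc + acc))
-- ===== Notes on version B (the rewrite author's own statement) =====
-- stated objective: alternative
-- what changed: The memoized recursion is replaced by an iterative depth-first traversal over an explicit stack of (node, pending-dependencies, accumulated-size) frames that performs the same memo writes in the same order.
import Mathlib
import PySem

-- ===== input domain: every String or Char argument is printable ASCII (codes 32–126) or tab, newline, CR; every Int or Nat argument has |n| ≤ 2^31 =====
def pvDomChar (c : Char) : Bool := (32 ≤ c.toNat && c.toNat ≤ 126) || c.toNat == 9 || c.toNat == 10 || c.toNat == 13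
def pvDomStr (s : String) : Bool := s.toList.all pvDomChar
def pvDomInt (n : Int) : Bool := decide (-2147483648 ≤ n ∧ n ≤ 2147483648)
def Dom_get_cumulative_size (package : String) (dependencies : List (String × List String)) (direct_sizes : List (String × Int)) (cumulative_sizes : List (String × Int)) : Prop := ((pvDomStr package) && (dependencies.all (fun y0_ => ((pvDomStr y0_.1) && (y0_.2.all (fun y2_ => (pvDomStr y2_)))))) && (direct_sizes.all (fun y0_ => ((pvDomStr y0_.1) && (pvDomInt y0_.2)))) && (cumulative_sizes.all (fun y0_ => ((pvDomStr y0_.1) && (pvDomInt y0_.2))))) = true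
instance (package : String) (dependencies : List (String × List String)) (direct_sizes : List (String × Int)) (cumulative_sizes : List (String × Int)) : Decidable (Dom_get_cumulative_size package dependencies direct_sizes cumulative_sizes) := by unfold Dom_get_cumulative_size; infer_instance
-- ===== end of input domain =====

-- B replaces the memoized recursion by an iterative DFS over an explicit stack of
-- (node, pending dependencies, accumulated size) frames (same cost; objective: alternative).
-- Both A and B mutate cumulative_sizes identically (same entries in the same order);
-- the equivalence proved here is about the return value.

-- ===== PORT A =====
-- dependencies.get(p, [])
def pvDeps (dependencies : List (String × List String)) (p : String) : List String :=
  PySem.Dict.getD (PySem.Dict.mk dependencies) p []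

-- direct_sizes.get(p, 0)
def pvDirect (direct_sizes : List (String × Int)) (p : String) : Int :=
  PySem.Dict.getD (PySem.Dict.mk direct_sizes) p 0

-- A's recursion, fueled (fuel bounds the recursion depth; under Pre_ it never runs out).
mutual
def pvGoA (dependencies : List (String × List String)) (direct_sizes : List (String × Int)) :
    Nat → String → PySem.Dict String Int → Option (Int × PySem.Dict String Int)
  | 0, _, _ => none
  | k+1, p, m =>
    match PySem.Dict.get? m p with
    | some v => some (v, m)
    | none =>
      match pvGoAList dependencies direct_sizes k (pvDeps dependencies p) (pvDirect direct_sizes p) m with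
      | some (s, m') => some (s, PySem.Dict.insert m' p s)
      | none => none
termination_by k _ _ => (k, 0)

-- the for-loop over dependencies.get(package, []), accumulating size and threading the memo
def pvGoAList (dependencies : List (String × List String)) (direct_sizes : List (String × Int)) :
    Nat → List String → Int → PySem.Dict String Int → Option (Int × PySem.Dict String Int)
  | _, [], s, m => some (s, m)
  | k, d :: ds, s, m =>
    match pvGoA dependencies direct_sizes k d m with
    | some (v, m') => pvGoAList dependencies direct_sizes k ds (s + v) m'
    | none => none
termination_by k ds _ _ => (k, ds.length + 1)
end

def get_cumulative_size (package : String) (dependencies : List (String × List String)) (direct_sizes : List (String × Int)) (cumulative_sizes : List (String × Int)) : Int :=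
  match pvGoA dependencies direct_sizes (dependencies.length + 2) package (PySem.Dict.mk cumulative_sizes) with
  | some (v, _) => v
  | none => 0

-- ===== PORT B =====
-- B's while-loop: one defuelled iteration per call; frames are (node, pending deps, acc).
def pvGoB (dependencies : List (String × List String)) (direct_sizes : List (String × Int)) :
    Nat → List (String × List String × Int) → PySem.Dict String Int → Option Int
  | 0, _, _ => none
  | _+1, [], _ => none
  | k+1, (n, d :: ds, acc) :: rest, m =>
    match PySem.Dict.get? m d with
    | some v => pvGoB dependencies direct_sizes k ((n, ds, acc + v) :: rest) m
    | none =>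
      pvGoB dependencies direct_sizes k
        ((d, pvDeps dependencies d, pvDirect direct_sizes d) :: (n, ds, acc) :: rest) m
  | k+1, (n, [], acc) :: rest, m =>
    match rest with
    | [] => some acc
    | (pn, pp, pacc) :: rest' =>
      pvGoB dependencies direct_sizes k ((pn, pp, pacc + acc) :: rest') (PySem.Dict.insert m n acc)

-- fuel for the loop (proved sufficient under Pre_; the Python loop has no fuel)
def pvFuelB (dependencies : List (String × List String)) (package : String) : Nat :=
  ((dependencies.map (fun kv => kv.2.length)).sum + 2) ^ (dependencies.length + 1)
    * ((pvDeps dependencies package).length + 1)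

def get_cumulative_size_alt (package : String) (dependencies : List (String × List String)) (direct_sizes : List (String × Int)) (cumulative_sizes : List (String × Int)) : Int :=
  match PySem.Dict.get? (PySem.Dict.mk cumulative_sizes) package with
  | some v => v
  | none =>
    (pvGoB dependencies direct_sizes (pvFuelB dependencies package)
      [(package, pvDeps dependencies package, pvDirect direct_sizes package)]
      (PySem.Dict.mk cumulative_sizes)).getD 0

-- ===== PRECONDITION & SPEC =====
-- is b reachable from a in 1..k steps along dependency edges whose target is not yet memoized?
def pvReach (cumulative_sizes : List (String × Int)) (dependencies : List (String × List String)) : Nat → String → String → Bool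
  | 0, _, _ => false
  | k+1, a, b => (pvDeps dependencies a).any
      (fun d => (PySem.Dict.get? (PySem.Dict.mk cumulative_sizes) d).isNone
        && (d == b || pvReach cumulative_sizes dependencies k d b))

-- Pre_ excludes exactly the inputs on which package is unmemoized and a dependency cycle is
-- reachable from package through unmemoized nodes: there A's recursion never terminates
-- (RecursionError) and B's loop would run forever.
def Pre_get_cumulative_size (package : String) (dependencies : List (String × List String)) (direct_sizes : List (String × Int)) (cumulative_sizes : List (String × Int)) : Prop :=
  (PySem.Dict.get? (PySem.Dict.mk cumulative_sizes) package).isSome = true ∨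
  ∀ a ∈ dependencies.map Prod.fst,
    (a = package ∨ pvReach cumulative_sizes dependencies (dependencies.length + 1) package a = true) →
    pvReach cumulative_sizes dependencies (dependencies.length + 1) a a = false

instance (package : String) (dependencies : List (String × List String)) (direct_sizes : List (String × Int)) (cumulative_sizes : List (String × Int)) : Decidable (Pre_get_cumulative_size package dependencies direct_sizes cumulative_sizes) := by unfold Pre_get_cumulative_size; infer_instance

def pvWitness_get_cumulative_size : String × (List (String × List String)) × (List (String × Int)) × (List (String × Int)) :=
  ("a", [("a", ["b", "c"]), ("b", ["c"])], [("a", 1), ("b", 2), ("c", 3)], [])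

def Spec_get_cumulative_size (package : String) (dependencies : List (String × List String)) (direct_sizes : List (String × Int)) (cumulative_sizes : List (String × Int)) (out : Int) : Prop := out = get_cumulative_size_alt package dependencies direct_sizes cumulative_sizes
instance (package : String) (dependencies : List (String × List String)) (direct_sizes : List (String × Int)) (cumulative_sizes : List (String × Int)) (out : Int) : Decidable (Spec_get_cumulative_size package dependencies direct_sizes cumulative_sizes out) := by unfold Spec_get_cumulative_size; infer_instance

-- ===== CLAIM (what is proved, stated in full; the proofs are below) =====
def Claim_equal_get_cumulative_size : Prop := ∀ (package : String) (dependencies : List (String × List String)) (direct_sizes : List (String × Int)) (cumulative_sizes : List (String × Int)), Dom_get_cumulative_size package dependencies direct_sizes cumulative_sizes → Pre_get_cumulative_size package dependencies direct_sizes cumulative_sizes → Spec_get_cumulative_size package dependencies direct_sizes cumulative_sizes (get_cumulative_size package dependencies direct_sizes cumulative_sizes)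

-- ===== LEMMAS AND PROOFS =====

-- first-match lookup on a cons cell
lemma pvDeps_cons (a : String) (v : List String) (dd : List (String × List String)) (d : String) :
    pvDeps ((a, v) :: dd) d = if a == d then v else pvDeps dd d := by
  simp [pvDeps, PySem.Dict.getD_eq_get?_getD, PySem.Dict.get?_mk_cons]
  split <;> rfl

lemma pvDeps_len_le (dd : List (String × List String)) (d : String) :
    (pvDeps dd d).length ≤ (dd.map (fun kv => kv.2.length)).sum := by
  induction dd with
  | nil => simp [pvDeps, PySem.Dict.getD, PySem.Dict.get?]
  | cons kv dd ih =>
    obtain ⟨a, v⟩ := kv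
    rw [pvDeps_cons]
    simp only [List.map_cons, List.sum_cons]
    split <;> omega

lemma pvMem_keys_of_deps (dd : List (String × List String)) (a : String)
    (h : pvDeps dd a ≠ []) : a ∈ dd.map Prod.fst := by
  induction dd with
  | nil => exact absurd rfl h
  | cons kv dd ih =>
    obtain ⟨k, v⟩ := kv
    rw [pvDeps_cons] at h
    by_cases hk : k == a
    · simp [eq_of_beq hk]
    · rw [if_neg hk] at h
      simp [ih h]

-- bound (in loop iterations of B) for the simulation of one A-level list run
def pvBnd (dd : List (String × List String)) : Nat → List String → Nat
  | 0, _ => 0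
  | _+1, [] => 0
  | k+1, d :: l => 2 + pvBnd dd k (pvDeps dd d) + pvBnd dd (k+1) l
termination_by k l => (k, l.length)

lemma pvBnd_le (dd : List (String × List String)) (C : Nat)
    (hC : ∀ d, (pvDeps dd d).length + 2 ≤ C) :
    ∀ (k : Nat) (l : List String), pvBnd dd k l + 1 ≤ C ^ k * (l.length + 1) := by
  have hC2 : 2 ≤ C := le_trans (by omega) (hC "")
  intro k
  induction k with
  | zero =>
    intro l
    simp only [pvBnd, pow_zero, one_mul]
    omega
  | succ k ih =>
    intro l
    induction l with
    | nil =>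
      simp only [pvBnd, List.length_nil]
      have : 1 ≤ C ^ (k + 1) := Nat.one_le_pow _ _ (by omega)
      omega
    | cons d l ihl =>
      have h1 := ih (pvDeps dd d)
      have hA : pvBnd dd k (pvDeps dd d) + 2 ≤ C ^ (k + 1) := by
        have hone : 1 ≤ C ^ k := Nat.one_le_pow _ _ (by omega)
        have h2 : C ^ k * ((pvDeps dd d).length + 1) + C ^ k = C ^ k * ((pvDeps dd d).length + 2) := by ring
        have h3 : C ^ k * ((pvDeps dd d).length + 2) ≤ C ^ k * C := Nat.mul_le_mul_left _ (hC d)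
        have h4 : C ^ k * C = C ^ (k + 1) := (pow_succ C k).symm
        omega
      have hB := ihl
      have hE : C ^ (k + 1) * (l.length + 1 + 1) = C ^ (k + 1) * (l.length + 1) + C ^ (k + 1) := by ring
      simp only [pvBnd, List.length_cons] at *
      omega


lemma pvGoB_mono (dd : List (String × List String)) (dz : List (String × Int)) :
    ∀ (k : Nat) (st : List (String × List String × Int)) (m : PySem.Dict String Int) (r : Int),
      pvGoB dd dz k st m = some r → pvGoB dd dz (k + 1) st m = some r := by
  intro k
  induction k with
  | zero => intro st m r h; simp [pvGoB] at h
  | succ k ih =>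
    intro st m r h
    cases st with
    | nil => simp [pvGoB] at h
    | cons fr rest =>
      obtain ⟨n, pending, acc⟩ := fr
      cases pending with
      | cons d ds =>
        cases hm : PySem.Dict.get? m d with
        | some v =>
          simp only [pvGoB, hm] at h ⊢
          exact ih _ _ _ h
        | none =>
          simp only [pvGoB, hm] at h ⊢
          exact ih _ _ _ h
      | nil =>
        cases rest with
        | nil => simpa [pvGoB] using h
        | cons fr' rest' =>
          obtain ⟨pn, pp, pacc⟩ := fr'
          simp only [pvGoB] at h ⊢
          exact ih _ _ _ h


lemma pvGoB_mono_le (dd : List (String × List String)) (dz : List (String × Int))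
    {k k' : Nat} (hk : k ≤ k') (st : List (String × List String × Int))
    (m : PySem.Dict String Int) (r : Int)
    (h : pvGoB dd dz k st m = some r) : pvGoB dd dz k' st m = some r := by
  induction hk with
  | refl => exact h
  | step _ ih => exact pvGoB_mono dd dz _ st m r ih


-- MAIN SIMULATION: the loop of B, run on a frame (n, l, s), reproduces A's list run exactly
lemma pvSim (dd : List (String × List String)) (dz : List (String × Int)) :
    ∀ (kA : Nat) (l : List String) (s : Int) (m : PySem.Dict String Int)
      (s' : Int) (m₁ : PySem.Dict String Int),
      pvGoAList dd dz kA l s m = some (s', m₁) →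
      ∀ (n : String) (rest : List (String × List String × Int)),
        ∃ j, j ≤ pvBnd dd kA l ∧
          ∀ k, pvGoB dd dz (k + j) ((n, l, s) :: rest) m = pvGoB dd dz k ((n, [], s') :: rest) m₁ := by
  intro kA
  induction kA with
  | zero =>
    intro l
    cases l with
    | nil =>
      intro s m s' m₁ h n rest
      simp only [pvGoAList, Option.some.injEq, Prod.mk.injEq] at h
      obtain ⟨rfl, rfl⟩ := h
      exact ⟨0, Nat.zero_le _, fun k => rfl⟩
    | cons d l =>
      intro s m s' m₁ h n rest
      simp [pvGoAList, pvGoA] at h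
  | succ k ih =>
    intro l
    induction l with
    | nil =>
      intro s m s' m₁ h n rest
      simp only [pvGoAList, Option.some.injEq, Prod.mk.injEq] at h
      obtain ⟨rfl, rfl⟩ := h
      exact ⟨0, Nat.zero_le _, fun k => rfl⟩
    | cons d l ihl =>
      intro s m s' m₁ h n rest
      cases hA : pvGoA dd dz (k + 1) d m with
      | none => simp [pvGoAList, hA] at h
      | some q =>
        obtain ⟨v, m'⟩ := q
        simp only [pvGoAList, hA] at h
        cases hm : PySem.Dict.get? m d with
        | some w =>
          have hv : v = w := by
            simp only [pvGoA, hm, Option.some.injEq, Prod.mk.injEq] at hA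
            exact hA.1.symm
          have hmm : m' = m := by
            simp only [pvGoA, hm, Option.some.injEq, Prod.mk.injEq] at hA
            exact hA.2.symm
          rw [hv, hmm] at h
          obtain ⟨j, hj, hsim⟩ := ihl (s + w) m s' m₁ h n rest
          refine ⟨j + 1, ?_, ?_⟩
          · simp only [pvBnd]; omega
          · intro K
            have e : K + (j + 1) = (K + j) + 1 := by omega
            rw [e]
            have step : pvGoB dd dz ((K + j) + 1) ((n, d :: l, s) :: rest) m
                = pvGoB dd dz (K + j) ((n, l, s + w) :: rest) m := by
              simp [pvGoB, hm]
            rw [step]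
            exact hsim K
        | none =>
          simp only [pvGoA, hm] at hA
          cases hI : pvGoAList dd dz k (pvDeps dd d) (pvDirect dz d) m with
          | none => rw [hI] at hA; simp at hA
          | some q2 =>
            obtain ⟨sd, m₂⟩ := q2
            rw [hI] at hA
            simp only [Option.some.injEq, Prod.mk.injEq] at hA
            obtain ⟨rfl, rfl⟩ := hA
            obtain ⟨j₁, hj₁, hs₁⟩ := ih (pvDeps dd d) (pvDirect dz d) m sd m₂ hI d ((n, l, s) :: rest)
            obtain ⟨j₂, hj₂, hs₂⟩ := ihl (s + sd) (PySem.Dict.insert m₂ d sd) s' m₁ h n rest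
            refine ⟨j₁ + j₂ + 2, ?_, ?_⟩
            · simp only [pvBnd]; omega
            · intro K
              have e : K + (j₁ + j₂ + 2) = ((K + j₂ + 1) + j₁) + 1 := by omega
              rw [e]
              have step1 : pvGoB dd dz (((K + j₂ + 1) + j₁) + 1) ((n, d :: l, s) :: rest) m
                  = pvGoB dd dz ((K + j₂ + 1) + j₁)
                      ((d, pvDeps dd d, pvDirect dz d) :: (n, l, s) :: rest) m := by
                simp [pvGoB, hm]
              rw [step1, hs₁ (K + j₂ + 1)]
              have step2 : pvGoB dd dz (K + j₂ + 1) ((d, [], sd) :: (n, l, s) :: rest) m₂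
                  = pvGoB dd dz (K + j₂) ((n, l, s + sd) :: rest) (PySem.Dict.insert m₂ d sd) := by
                simp [pvGoB]
              rw [step2]
              exact hs₂ K


-- an edge path a -> x1 -> ... -> xk whose every node after a is not in the initial memo
def pvPathM (cs : List (String × Int)) (dd : List (String × List String)) : String → List String → Prop
  | _, [] => True
  | a, d :: l => d ∈ pvDeps dd a ∧ PySem.Dict.get? (PySem.Dict.mk cs) d = none ∧ pvPathM cs dd d l

lemma pvPathM_suffix (cs : List (String × Int)) (dd : List (String × List String)) :
    ∀ (P : List String) (xs : List String) (a x : String) (Q : List String),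
      pvPathM cs dd a xs → a :: xs = P ++ x :: Q → pvPathM cs dd x Q := by
  intro P
  induction P with
  | nil =>
    intro xs a x Q hp he
    simp only [List.nil_append, List.cons.injEq] at he
    obtain ⟨rfl, rfl⟩ := he
    exact hp
  | cons p P ih =>
    intro xs a x Q hp he
    simp only [List.cons_append, List.cons.injEq] at he
    obtain ⟨rfl, he⟩ := he
    cases xs with
    | nil => exact absurd he.symm (by simp)
    | cons d xs' =>
      obtain ⟨_, _, hp'⟩ := hp
      exact ih xs' d x Q hp' he

lemma pvPathM_prefix (cs : List (String × Int)) (dd : List (String × List String)) :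
    ∀ (ys : List String) (a : String) (zs : List String),
      pvPathM cs dd a (ys ++ zs) → pvPathM cs dd a ys := by
  intro ys
  induction ys with
  | nil => intro a zs _; trivial
  | cons d ys ih =>
    intro a zs hp
    obtain ⟨hd, hu, hp'⟩ := hp
    exact ⟨hd, hu, ih d zs hp'⟩

lemma pvPathM_keys (cs : List (String × Int)) (dd : List (String × List String)) :
    ∀ (xs : List String) (a : String), pvPathM cs dd a xs →
      ∀ y ∈ (a :: xs).dropLast, pvDeps dd y ≠ [] := by
  intro xs
  induction xs with
  | nil => intro a _ y hy; simp at hy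
  | cons d xs ih =>
    intro a hp y hy
    obtain ⟨hd, _, hp'⟩ := hp
    rw [List.dropLast_cons₂] at hy
    rcases List.mem_cons.mp hy with rfl | hy'
    · exact List.ne_nil_of_mem hd
    · exact ih d hp' y hy'

lemma pvReach_of_pathM (cs : List (String × Int)) (dd : List (String × List String)) :
    ∀ (ys : List String) (a b : String) (k : Nat),
      pvPathM cs dd a ys → ys.getLast? = some b → ys.length ≤ k →
      pvReach cs dd k a b = true := by
  intro ys
  induction ys with
  | nil => intro a b k _ h; simp at h
  | cons d ys ih =>
    intro a b k hp hlast hlen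
    obtain ⟨hd, hu, hp'⟩ := hp
    cases k with
    | zero => simp at hlen
    | succ k =>
      simp only [pvReach, List.any_eq_true]
      refine ⟨d, hd, ?_⟩
      rw [hu]
      cases ys with
      | nil =>
        simp only [List.getLast?_singleton, Option.some.injEq] at hlast
        subst hlast
        simp
      | cons e ys' =>
        rw [List.getLast?_cons_cons] at hlast
        have := ih d b k hp' hlast (by simpa using Nat.le_of_succ_le_succ hlen)
        simp [this]

-- a successful run never removes a memo key
lemma pvMono (dd : List (String × List String)) (dz : List (String × Int)) :
    ∀ (k : Nat),
      (∀ (n : String) (m : PySem.Dict String Int) (v : Int) (m' : PySem.Dict String Int),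
        pvGoA dd dz k n m = some (v, m') →
        ∀ x, PySem.Dict.get? m' x = none → PySem.Dict.get? m x = none) ∧
      (∀ (l : List String) (s : Int) (m : PySem.Dict String Int) (s' : Int) (m₁ : PySem.Dict String Int),
        pvGoAList dd dz k l s m = some (s', m₁) →
        ∀ x, PySem.Dict.get? m₁ x = none → PySem.Dict.get? m x = none) := by
  intro k
  induction k with
  | zero =>
    constructor
    · intro n m v m' h; simp [pvGoA] at h
    · intro l s m s' m₁ h
      cases l with
      | nil =>
        simp only [pvGoAList, Option.some.injEq, Prod.mk.injEq] at h
        obtain ⟨rfl, rfl⟩ := h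
        exact fun x hx => hx
      | cons d l => simp [pvGoAList, pvGoA] at h
  | succ k ih =>
    obtain ⟨_, ihL⟩ := ih
    have hA : ∀ (n : String) (m : PySem.Dict String Int) (v : Int) (m' : PySem.Dict String Int),
        pvGoA dd dz (k+1) n m = some (v, m') →
        ∀ x, PySem.Dict.get? m' x = none → PySem.Dict.get? m x = none := by
      intro n m v m' h x hx
      cases hm : PySem.Dict.get? m n with
      | some w =>
        simp only [pvGoA, hm, Option.some.injEq, Prod.mk.injEq] at h
        rw [← h.2] at hx
        exact hx
      | none =>
        simp only [pvGoA, hm] at h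
        cases hI : pvGoAList dd dz k (pvDeps dd n) (pvDirect dz n) m with
        | none => rw [hI] at h; simp at h
        | some q =>
          obtain ⟨sv, m₂⟩ := q
          rw [hI] at h
          simp only [Option.some.injEq, Prod.mk.injEq] at h
          rw [← h.2, PySem.Dict.get?_insert] at hx
          by_cases hxn : x = n
          · rw [if_pos hxn] at hx; exact absurd hx (by simp)
          · rw [if_neg hxn] at hx
            exact ihL _ _ _ _ _ hI x hx
    refine ⟨hA, ?_⟩
    intro l
    induction l with
    | nil =>
      intro s m s' m₁ h
      simp only [pvGoAList, Option.some.injEq, Prod.mk.injEq] at h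
      obtain ⟨rfl, rfl⟩ := h
      exact fun x hx => hx
    | cons d l ihl =>
      intro s m s' m₁ h x hx
      cases hA' : pvGoA dd dz (k+1) d m with
      | none => simp [pvGoAList, hA'] at h
      | some q =>
        obtain ⟨v, m'⟩ := q
        simp only [pvGoAList, hA'] at h
        exact hA d m v m' hA' x (ihl (s + v) m' s' m₁ h x hx)

-- a failing list run pinpoints a failing dependency call, over a memo no richer than m
lemma pvFailList (dd : List (String × List String)) (dz : List (String × Int)) (k : Nat) :
    ∀ (l : List String) (s : Int) (m : PySem.Dict String Int),
      pvGoAList dd dz k l s m = none →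
      ∃ d ∈ l, ∃ m2 : PySem.Dict String Int,
        (∀ x, PySem.Dict.get? m2 x = none → PySem.Dict.get? m x = none) ∧
        pvGoA dd dz k d m2 = none := by
  intro l
  induction l with
  | nil => intro s m h; simp [pvGoAList] at h
  | cons d l ih =>
    intro s m h
    cases hA : pvGoA dd dz k d m with
    | none => exact ⟨d, List.mem_cons_self, m, fun x hx => hx, hA⟩
    | some q =>
      obtain ⟨v, m'⟩ := q
      simp only [pvGoAList, hA] at h
      obtain ⟨d', hd', m2, hmono, hfail⟩ := ih (s + v) m' h
      exact ⟨d', List.mem_cons_of_mem _ hd', m2,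
        fun x hx => (pvMono dd dz k).1 d m v m' hA x (hmono x hx), hfail⟩

-- fuel exhaustion at fuel k+1 yields an unmemoized edge path of length k
lemma pvExhaustM (dd : List (String × List String)) (dz : List (String × Int)) (cs : List (String × Int)) :
    ∀ (k : Nat) (n : String) (m : PySem.Dict String Int),
      (∀ x, PySem.Dict.get? m x = none → PySem.Dict.get? (PySem.Dict.mk cs) x = none) →
      pvGoA dd dz (k + 1) n m = none →
      ∃ zs : List String, zs.length = k ∧ pvPathM cs dd n zs := by
  intro k
  induction k with
  | zero => intro n m _ _; exact ⟨[], rfl, trivial⟩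
  | succ k ih =>
    intro n m hmcs h
    cases hm : PySem.Dict.get? m n with
    | some w => simp [pvGoA, hm] at h
    | none =>
      simp only [pvGoA, hm] at h
      cases hI : pvGoAList dd dz (k + 1) (pvDeps dd n) (pvDirect dz n) m with
      | some q => rw [hI] at h; simp at h
      | none =>
        obtain ⟨d, hd, m2, hmono, hfail⟩ := pvFailList dd dz (k + 1) (pvDeps dd n) (pvDirect dz n) m hI
        have hd2 : PySem.Dict.get? m2 d = none := by
          cases hd2 : PySem.Dict.get? m2 d with
          | some w => simp [pvGoA, hd2] at hfail
          | none => rfl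
        have hdcs : PySem.Dict.get? (PySem.Dict.mk cs) d = none := hmcs d (hmono d hd2)
        obtain ⟨zs, hlen, hpath⟩ := ih d m2 (fun x hx => hmcs x (hmono x hx)) hfail
        exact ⟨d :: zs, by simp [hlen], hd, hdcs, hpath⟩

lemma pvLen_le_of_nodup_subset (l ks : List String) (hnd : l.Nodup)
    (hsub : ∀ y ∈ l, y ∈ ks) : l.length ≤ ks.length := by
  calc l.length = l.toFinset.card := (List.toFinset_card_of_nodup hnd).symm
    _ ≤ ks.toFinset.card := Finset.card_le_card (fun y hy => by
        simp only [List.mem_toFinset] at *; exact hsub y hy)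
    _ ≤ ks.length := ks.toFinset_card_le

lemma pvDecomp (l : List String) (hnd : ¬ l.Nodup) :
    ∃ x l1 l2 l3, l = l1 ++ x :: l2 ++ x :: l3 := by
  induction l with
  | nil => exact absurd List.nodup_nil hnd
  | cons h t ih =>
    by_cases hm : h ∈ t
    · obtain ⟨s, t', rfl⟩ := List.append_of_mem hm
      exact ⟨h, [], s, t', by simp⟩
    · have : ¬ t.Nodup := fun hnt => hnd (List.nodup_cons.mpr ⟨hm, hnt⟩)
      obtain ⟨x, l1, l2, l3, rfl⟩ := ih this
      exact ⟨x, h :: l1, l2, l3, by simp⟩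


lemma pvNoExhaust (dd : List (String × List String)) (dz : List (String × Int)) (cs : List (String × Int)) (p : String)
    (hm : PySem.Dict.get? (PySem.Dict.mk cs) p = none)
    (hpre : ∀ a ∈ dd.map Prod.fst,
      (a = p ∨ pvReach cs dd (dd.length + 1) p a = true) →
      pvReach cs dd (dd.length + 1) a a = false) :
    pvGoA dd dz (dd.length + 2) p (PySem.Dict.mk cs) ≠ none := by
  intro h
  obtain ⟨zs, hlen, hpath⟩ :=
    pvExhaustM dd dz cs (dd.length + 1) p (PySem.Dict.mk cs) (fun x hx => hx) h
  have hne : (p :: zs) ≠ [] := by simp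
  set ns := (p :: zs).dropLast with hns_def
  have hns : ns.length = dd.length + 1 := by
    simp [hns_def, List.length_dropLast, hlen]
  have hkeys : ∀ y ∈ ns, y ∈ dd.map Prod.fst := fun y hy =>
    pvMem_keys_of_deps dd y (pvPathM_keys cs dd zs p hpath y hy)
  have hnot : ¬ ns.Nodup := by
    intro hnd
    have := pvLen_le_of_nodup_subset ns (dd.map Prod.fst) hnd hkeys
    simp only [List.length_map] at this
    omega
  obtain ⟨x, l1, l2, l3, hdec⟩ := pvDecomp ns hnot
  have hsplit : p :: zs = ns ++ [(p :: zs).getLast hne] := (List.dropLast_append_getLast hne).symm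
  set z := (p :: zs).getLast hne with hz
  have hfull : p :: zs = l1 ++ x :: (l2 ++ x :: (l3 ++ [z])) := by
    rw [hsplit, hdec]; simp
  have hlens : ns.length = l1.length + (l2.length + (l3.length + 2)) := by
    rw [hdec]; simp; omega
  -- the cycle at x
  have hx : pvPathM cs dd x (l2 ++ x :: (l3 ++ [z])) := pvPathM_suffix cs dd l1 zs p x _ hpath hfull
  have hx2 : pvPathM cs dd x (l2 ++ [x]) := by
    apply pvPathM_prefix cs dd (l2 ++ [x]) x (l3 ++ [z])
    have : (l2 ++ [x]) ++ (l3 ++ [z]) = l2 ++ x :: (l3 ++ [z]) := by simp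
    rw [this]; exact hx
  have hcyc : pvReach cs dd (dd.length + 1) x x = true := by
    apply pvReach_of_pathM cs dd (l2 ++ [x]) x x (dd.length + 1) hx2 List.getLast?_concat
    simp only [List.length_append, List.length_cons, List.length_nil]
    omega
  -- x is reachable from p (or is p)
  have hfromp : x = p ∨ pvReach cs dd (dd.length + 1) p x = true := by
    cases l1 with
    | nil =>
      simp only [List.nil_append, List.cons.injEq] at hfull
      exact Or.inl hfull.1.symm
    | cons q l1' =>
      simp only [List.cons_append, List.cons.injEq] at hfull
      obtain ⟨rfl, hzs⟩ := hfull
      right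
      have hpx : pvPathM cs dd p (l1' ++ [x]) := by
        apply pvPathM_prefix cs dd (l1' ++ [x]) p (l2 ++ x :: (l3 ++ [z]))
        have : (l1' ++ [x]) ++ (l2 ++ x :: (l3 ++ [z])) = l1' ++ x :: (l2 ++ x :: (l3 ++ [z])) := by simp
        rw [this, ← hzs]; exact hpath
      apply pvReach_of_pathM cs dd (l1' ++ [x]) p x (dd.length + 1) hpx List.getLast?_concat
      simp only [List.length_cons] at hlens
      simp only [List.length_append, List.length_cons, List.length_nil]
      omega
  have hxkey : x ∈ dd.map Prod.fst := hkeys x (by rw [hdec]; simp)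
  rw [hpre x hxkey (by rcases hfromp with h' | h'; exact Or.inl h'; exact Or.inr h')] at hcyc
  exact Bool.false_ne_true hcyc

-- ===== VERDICT (by name: the statement is the Claim_ definition above) =====
theorem get_cumulative_size_spec : Claim_equal_get_cumulative_size := by
  intro p dd dz cs _ hpre
  unfold Spec_get_cumulative_size get_cumulative_size get_cumulative_size_alt
  rw [show dd.length + 2 = (dd.length + 1) + 1 from rfl]
  cases hm : PySem.Dict.get? (PySem.Dict.mk cs) p with
  | some v => simp [pvGoA, hm]
  | none =>
    have hpre2 : ∀ a ∈ dd.map Prod.fst,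
        (a = p ∨ pvReach cs dd (dd.length + 1) p a = true) →
        pvReach cs dd (dd.length + 1) a a = false := by
      rcases hpre with hpre1 | hpre2
      · rw [hm] at hpre1; simp at hpre1
      · exact hpre2
    have hne := pvNoExhaust dd dz cs p hm hpre2
    rw [show dd.length + 2 = (dd.length + 1) + 1 from rfl] at hne
    cases hA : pvGoA dd dz ((dd.length + 1) + 1) p (PySem.Dict.mk cs) with
    | none => exact absurd hA hne
    | some q =>
      obtain ⟨v, m'⟩ := q
      simp only [pvGoA, hm] at hA
      cases hI : pvGoAList dd dz (dd.length + 1) (pvDeps dd p) (pvDirect dz p) (PySem.Dict.mk cs) with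
      | none => rw [hI] at hA; simp at hA
      | some q2 =>
        obtain ⟨sv, m₁⟩ := q2
        rw [hI] at hA
        simp only [Option.some.injEq, Prod.mk.injEq] at hA
        obtain ⟨j, hj, hsim⟩ :=
          pvSim dd dz (dd.length + 1) (pvDeps dd p) (pvDirect dz p) (PySem.Dict.mk cs) sv m₁ hI p []
        have h1 : pvGoB dd dz (1 + j) [(p, pvDeps dd p, pvDirect dz p)] (PySem.Dict.mk cs)
            = some sv := by
          have hfin : pvGoB dd dz 1 [(p, [], sv)] m₁ = some sv := by simp [pvGoB]
          rw [hsim 1, hfin]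
        have hb := pvBnd_le dd ((dd.map (fun kv => kv.2.length)).sum + 2)
          (fun d => by have := pvDeps_len_le dd d; omega) (dd.length + 1) (pvDeps dd p)
        have hle : 1 + j ≤ pvFuelB dd p := by
          simp only [pvFuelB]
          omega
        have h2 := pvGoB_mono_le dd dz hle _ _ _ h1
        rw [h2]
        simp [← hA.1]
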